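-- pv_equiv track=rewrite | github.com/ZizhanHe/ZizhanHe | Python proj1/coins.py | is_base202
-- ===== SOURCE A (Python) =====
-- base202_chars='0C2OMPIN'
--
-- def is_base202(text):
--     '''
--     (str)->(bool)
--     The function takes in a string of any length and returns True if the string
--     is a valid comp202coin string, False if not.
--     >>>is_base202('eisfs3010comp')
--     False
--     >>>is_base202('1ccomp20MP')
--     False
--     >>>is_base202('0cComp2020')
--     True
--     >>>is_base202('0cCoRp2020')
--     False
--     '''
--     text=text.upper()
--     if len(text) != 10:
--         return False
--     if text[:2] != '0C':
--         return False
--     for num in text[2:]: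
--         if num not in base202_chars:
--             return False
--     return True
-- ===== SOURCE B (Python) =====
-- def is_base202(text):
--     # Table-free DFA: states 0..10 (-1 dead); scan the raw characters once,
--     # case handled by putting both cases in the transition alphabet (no .upper()).
--     state = 0
--     for ch in text:
--         if state == 0:
--             state = 1 if ch == '0' else -1
--         elif state == 1:
--             state = 2 if ch in 'Cc' else -1
--         elif 2 <= state <= 9:
--             state = state + 1 if ch in '0C2OMPIN0c2ompin' else -1
--         else:
--             state = -1
--     return state == 10
-- ===== Notes on version B (the rewrite author's own statement) =====
-- stated objective: alternative
-- what changed: Replaces the uppercasing, length check, prefix compare and membership loop by a deterministic finite automaton: one scan of the raw characters updating a state counter 0..10 (with a dead state), case-insensitivity encoded in the transition alphabet, accepting iff the final state is 10.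
import Mathlib
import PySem

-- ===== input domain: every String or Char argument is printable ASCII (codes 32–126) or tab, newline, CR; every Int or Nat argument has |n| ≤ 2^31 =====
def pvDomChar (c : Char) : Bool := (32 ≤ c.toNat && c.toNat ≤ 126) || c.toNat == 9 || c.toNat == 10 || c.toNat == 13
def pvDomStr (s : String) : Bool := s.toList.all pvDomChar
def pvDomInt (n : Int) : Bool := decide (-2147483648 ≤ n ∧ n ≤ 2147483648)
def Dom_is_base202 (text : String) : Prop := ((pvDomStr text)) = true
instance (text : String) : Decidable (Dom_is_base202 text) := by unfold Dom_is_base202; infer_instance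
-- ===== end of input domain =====

-- B replaces A's uppercasing, length/prefix guards and membership loop by a
-- table-free DFA (state counter 0..10, dead state -1) scanning the raw characters
-- once, with case-insensitivity encoded in the transition alphabet (alternative; same cost).


-- ===== PORT A =====
def base202_chars : String := "0C2OMPIN"

-- the 'for num in text[2:]' loop with its early 'return False'
def isBase202Loop : List Char → Bool
  | [] => true
  | num :: rest =>
      if !(PySem.Str.isIn (String.ofList [num]) base202_chars) then false
      else isBase202Loop rest

def is_base202 (text : String) : Bool :=
  let t := PySem.Str.upper text
  if PySem.Str.len t ≠ 10 then false
  else if PySem.Str.slice t none (some 2) ≠ "0C" then false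
  else isBase202Loop (PySem.Str.slice t (some 2) none).toList

-- ===== PORT B =====
-- one DFA transition: the if/elif chain of Source B's loop body
def b202Step (state : Int) (ch : Char) : Int :=
  if state == 0 then (if ch == '0' then 1 else -1)
  else if state == 1 then (if PySem.Str.isIn (String.ofList [ch]) "Cc" then 2 else -1)
  else if 2 ≤ state ∧ state ≤ 9 then
    (if PySem.Str.isIn (String.ofList [ch]) "0C2OMPIN0c2ompin" then state + 1 else -1)
  else -1

def is_base202_alt (text : String) : Bool :=
  (text.toList.foldl b202Step 0) == 10

-- ===== PRECONDITION & SPEC =====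
def Spec_is_base202 (text : String) (out : Bool) : Prop := out = is_base202_alt text
instance (text : String) (out : Bool) : Decidable (Spec_is_base202 text out) := by unfold Spec_is_base202; infer_instance

-- ===== CLAIM (what is proved, stated in full; the proofs are below) =====
def Claim_equal_is_base202 : Prop := ∀ (text : String), Dom_is_base202 text → Spec_is_base202 text (is_base202 text)

-- ===== LEMMAS AND PROOFS =====

theorem char_eq_iff_toNat (c t : Char) : c = t ↔ c.toNat = t.toNat :=
  ⟨fun h => by rw [h], fun h => Char.ext (UInt32.toNat_inj.mp h)⟩

theorem islower_iff (c : Char) :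
    PySem.Chars.islower c = true ↔ (97 ≤ c.toNat ∧ c.toNat ≤ 122) := by
  simp [PySem.Chars.islower, Char.le_def, UInt32.le_iff_toNat_le]

theorem upperChar_toNat (c : Char) :
    (PySem.Chars.upperChar c).toNat =
      if 97 ≤ c.toNat ∧ c.toNat ≤ 122 then c.toNat - 32 else c.toNat := by
  unfold PySem.Chars.upperChar
  rcases h : PySem.Chars.islower c with _|_
  · have hn : ¬ (97 ≤ c.toNat ∧ c.toNat ≤ 122) := by
      rw [← islower_iff, h]; simp
    rw [if_neg (by simp), if_neg hn]
  · have hp := (islower_iff c).mp h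
    rw [if_pos (by simp), if_pos hp, Char.toNat_ofNat, if_pos (Or.inl (by omega))]

theorem upperChar_eq_iff (c t : Char) :
    PySem.Chars.upperChar c = t ↔
      ((¬ (97 ≤ c.toNat ∧ c.toNat ≤ 122) ∧ c.toNat = t.toNat) ∨
       (97 ≤ c.toNat ∧ c.toNat ≤ 122 ∧ c.toNat - 32 = t.toNat)) := by
  rw [char_eq_iff_toNat, upperChar_toNat]
  split_ifs with h
  · constructor
    · intro he; exact Or.inr ⟨h.1, h.2, he⟩
    · rintro (⟨hn, _⟩ | ⟨_, _, he⟩); · exact absurd h hn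
      · exact he
  · constructor
    · intro he; exact Or.inl ⟨h, he⟩
    · rintro (⟨_, he⟩ | ⟨h1, h2, _⟩); · exact he
      · exact absurd ⟨h1, h2⟩ h

-- single-character 'in' on a string is list membership
theorem isIn_singleton (c : Char) (s : String) :
    PySem.Str.isIn (String.ofList [c]) s = s.toList.contains c := by
  rcases h : s.toList.contains c with _|_
  · simp only [Bool.eq_false_iff]
    intro hc
    rw [PySem.Str.isIn_iff_infix] at hc
    simp at hc h
    exact h (hc.subset (by simp))
  · rw [PySem.Str.isIn_iff_infix]
    simp at h ⊢
    obtain ⟨p, q, hpq⟩ := List.append_of_mem h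
    exact ⟨p, q, by rw [hpq]; simp⟩

theorem isBase202Loop_eq_all (l : List Char) :
    isBase202Loop l = l.all (fun c => base202_chars.toList.contains c) := by
  induction l with
  | nil => rfl
  | cons c rest ih =>
      simp only [isBase202Loop, isIn_singleton, List.all_cons, ih]
      cases h : base202_chars.toList.contains c <;> simp

-- uppercasing commutes with the alphabets: upper(c) ∈ "0C2OMPIN" ↔ c ∈ "0C2OMPIN0c2ompin"
theorem contains_upper_alphabet (c : Char) :
    base202_chars.toList.contains (PySem.Chars.upperChar c)
      = ("0C2OMPIN0c2ompin".toList.contains c) := by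
  rw [Bool.eq_iff_iff]
  have e8 : base202_chars.toList = ['0','C','2','O','M','P','I','N'] := rfl
  have e16 : "0C2OMPIN0c2ompin".toList
      = ['0','C','2','O','M','P','I','N','0','c','2','o','m','p','i','n'] := rfl
  rw [e8, e16]
  simp only [List.contains_cons, List.contains_nil, Bool.or_eq_true, beq_iff_eq,
    Bool.false_eq_true, or_false]
  simp only [upperChar_eq_iff]
  simp only [char_eq_iff_toNat]
  simp
  omega

-- the four shapes of a transition
theorem b202Step_zero (c : Char) : b202Step 0 c = if c == '0' then 1 else -1 := by
  simp [b202Step]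

theorem b202Step_one (c : Char) :
    b202Step 1 c = if PySem.Str.isIn (String.ofList [c]) "Cc" then 2 else -1 := by
  simp [b202Step]

theorem b202Step_ten (c : Char) : b202Step 10 c = -1 := by
  simp [b202Step]

theorem b202Step_dead (c : Char) : b202Step (-1) c = -1 := by
  simp [b202Step]

-- the dead state absorbs
theorem foldl_b202Step_dead (l : List Char) : l.foldl b202Step (-1) = -1 := by
  induction l with
  | nil => rfl
  | cons c rest ih => simp only [List.foldl_cons, b202Step_dead, ih]

-- each transition either advances by one or dies
theorem b202Step_cases (s : Int) (c : Char) :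
    b202Step s c = -1 ∨ b202Step s c = s + 1 := by
  unfold b202Step
  split_ifs with h0 h0' h1 h1' h2 h2'
  · simp only [beq_iff_eq] at h0; omega
  · exact Or.inl rfl
  · simp only [beq_iff_eq] at h1; omega
  · exact Or.inl rfl
  · exact Or.inr rfl
  · exact Or.inl rfl
  · exact Or.inl rfl

-- accepting forces the input to have exactly the remaining length
theorem foldl_b202Step_length (l : List Char) (s : Int) (hs : 0 ≤ s)
    (h : l.foldl b202Step s = 10) : s + (l.length : Int) = 10 := by
  induction l generalizing s with
  | nil => simpa using h
  | cons c rest ih =>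
      rcases b202Step_cases s c with hc | hc
      · rw [List.foldl_cons, hc, foldl_b202Step_dead] at h
        exact absurd h (by norm_num)
      · rw [List.foldl_cons, hc] at h
        have := ih (s + 1) (by omega) h
        simp only [List.length_cons]
        push_cast at this ⊢
        omega

-- from a middle state, acceptance = right length + all chars in the 16-char alphabet
theorem foldl_b202Step_mid (l : List Char) (s : Int) (h2 : 2 ≤ s) (h10 : s ≤ 10) :
    (l.foldl b202Step s = 10) ↔
      (s + (l.length : Int) = 10 ∧
        l.all (fun c => "0C2OMPIN0c2ompin".toList.contains c) = true) := by
  induction l generalizing s with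
  | nil =>
      simp only [List.foldl_nil, List.length_nil, List.all_nil, and_true]
      omega
  | cons c rest ih =>
      by_cases h9 : s ≤ 9
      · have hstep : b202Step s c =
            (if PySem.Str.isIn (String.ofList [c]) "0C2OMPIN0c2ompin" then s + 1 else -1) := by
          unfold b202Step
          rw [if_neg (by simp; omega), if_neg (by simp; omega), if_pos ⟨h2, h9⟩]
        rw [List.foldl_cons, hstep]
        rcases hin : PySem.Str.isIn (String.ofList [c]) "0C2OMPIN0c2ompin" with _|_
        · rw [if_neg (by simp), foldl_b202Step_dead]
          rw [isIn_singleton] at hin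
          constructor
          · intro h; exact absurd h (by norm_num)
          · rintro ⟨-, hall⟩
            rw [List.all_cons, hin] at hall
            simp at hall
        · rw [if_pos rfl, ih (s + 1) (by omega) (by omega)]
          rw [isIn_singleton] at hin
          simp only [List.all_cons, hin, Bool.true_and, List.length_cons]
          constructor
          · rintro ⟨hl, ha⟩; exact ⟨by push_cast at hl ⊢; omega, ha⟩
          · rintro ⟨hl, ha⟩; exact ⟨by push_cast at hl ⊢; omega, ha⟩
      · have hs10 : s = 10 := by omega
        subst hs10
        rw [List.foldl_cons, b202Step_ten, foldl_b202Step_dead]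
        simp only [List.length_cons]
        constructor
        · intro h; exact absurd h (by norm_num)
        · rintro ⟨hl, -⟩; push_cast at hl; omega

-- ===== VERDICT (by name: the statement is the Claim_ definition above) =====
theorem is_base202_spec : Claim_equal_is_base202 := by
  intro text _
  unfold Spec_is_base202 is_base202 is_base202_alt
  have hlen : PySem.Str.len (PySem.Str.upper text) = (text.toList.length : Int) := by
    rw [PySem.Str.len_eq, PySem.Str.toList_upper]
    simp [PySem.Chars.upper]
  by_cases h10 : text.toList.length = 10
  · -- decompose the 10-character string as a :: b :: rest with |rest| = 8
    obtain ⟨a, b, rest, hl, hr8⟩ :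
        ∃ a b rest, text.toList = a :: b :: rest ∧ rest.length = 8 := by
      cases hl : text.toList with
      | nil => rw [hl] at h10; simp at h10
      | cons a l1 =>
          cases hc : l1 with
          | nil => rw [hl, hc] at h10; simp at h10
          | cons b rest =>
              refine ⟨a, b, rest, by rw [hc] at hl, ?_⟩
              rw [hl, hc] at h10; simpa using h10
    have hu : (PySem.Str.upper text).toList
        = PySem.Chars.upperChar a :: PySem.Chars.upperChar b
            :: rest.map PySem.Chars.upperChar := by
      rw [PySem.Str.toList_upper, hl]; simp [PySem.Chars.upper]
    rw [if_neg (by rw [hlen, hl]; simp [hr8])]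
    have hslice : (PySem.Str.slice (PySem.Str.upper text) none (some 2)).toList
        = [PySem.Chars.upperChar a, PySem.Chars.upperChar b] := by
      rw [PySem.Str.toList_slice, PySem.Chars.slice_eq_listSlice,
          PySem.List.slice_to _ (by norm_num), hu]
      simp
    have hsl2 : (PySem.Str.slice (PySem.Str.upper text) none (some 2) = "0C")
        ↔ (PySem.Chars.upperChar a = '0' ∧ PySem.Chars.upperChar b = 'C') := by
      rw [← String.toList_inj, hslice]
      simp
    have hdrop : (PySem.Str.slice (PySem.Str.upper text) (some 2) none).toList
        = rest.map PySem.Chars.upperChar := by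
      rw [PySem.Str.toList_slice, PySem.Chars.slice_eq_listSlice,
          PySem.List.slice_from _ (by norm_num), hu]
      simp
    rw [hl]
    by_cases hA : PySem.Chars.upperChar a = '0' ∧ PySem.Chars.upperChar b = 'C'
    · rw [if_neg (by simp only [ne_eq, not_not]; exact hsl2.mpr hA)]
      rw [hdrop, isBase202Loop_eq_all]
      have ha0 : a = '0' := by
        have h := (upperChar_eq_iff a '0').mp hA.1
        rw [char_eq_iff_toNat]
        simp at h ⊢
        omega
      have hbC : b = 'C' ∨ b = 'c' := by
        have h := (upperChar_eq_iff b 'C').mp hA.2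
        rw [char_eq_iff_toNat, char_eq_iff_toNat]
        simp at h ⊢
        omega
      have hs1 : b202Step 0 a = 1 := by
        rw [b202Step_zero, if_pos (by simp [ha0])]
      have hs2 : b202Step 1 b = 2 := by
        rw [b202Step_one, if_pos ?_]
        rw [isIn_singleton]
        rcases hbC with rfl | rfl <;> rfl
      simp only [List.foldl_cons, hs1, hs2]
      rw [Bool.eq_iff_iff, beq_iff_eq,
          foldl_b202Step_mid rest 2 (by norm_num) (by norm_num)]
      simp only [List.all_map, Function.comp_def, contains_upper_alphabet, hr8]
      simp
    · rw [if_pos (fun h => hA (hsl2.mp h))]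
      -- B must die within the first two transitions
      have hdie : rest.foldl b202Step (b202Step (b202Step 0 a) b) = -1 := by
        by_cases ha0 : a = '0'
        · have hs1 : b202Step 0 a = 1 := by
            rw [b202Step_zero, if_pos (by simp [ha0])]
          have hbC : ¬ (b = 'C' ∨ b = 'c') := by
            intro hb
            apply hA
            refine ⟨by rw [ha0]; decide, ?_⟩
            rcases hb with rfl | rfl <;> decide
          have hs2 : b202Step 1 b = -1 := by
            rw [b202Step_one, if_neg ?_]
            rw [isIn_singleton]
            intro hc
            apply hbC
            have : b ∈ "Cc".toList := by simpa using hc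
            simpa using this
          rw [hs1, hs2, foldl_b202Step_dead]
        · have hs1 : b202Step 0 a = -1 := by
            rw [b202Step_zero, if_neg (by simp [ha0])]
          rw [hs1, b202Step_dead, foldl_b202Step_dead]
      simp only [List.foldl_cons]
      rw [hdie]
      rfl
  · -- length ≠ 10: A returns False at the first guard, B cannot reach state 10
    rw [if_pos (by rw [hlen]; exact_mod_cast fun h => h10 (by exact_mod_cast h))]
    rcases hfb : (text.toList.foldl b202Step 0 == 10) with _|_
    · rfl
    · exfalso
      have := foldl_b202Step_length text.toList 0 (by norm_num) (by simpa using hfb)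
      apply h10
      omega
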